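-- pv_equiv track=rewrite | github.com/PRKKILLER/Algorithm_Practice | Company-OA/Robinhood/Bouncing Diagnal.py | bouncingDiagonals
-- ===== SOURCE A (Python) =====
-- def bouncingDiagonals(matrix):
--     res = []
--
--     m = len(matrix)
--     top = 0
--
--     for i in range(m):
--         top += matrix[i][i]
--
--     res.append([top, matrix[0][0]])
--
--     for idx in range(1, m):
--         tmp = 0
--         i, j = idx, 0
--         while i >= 0 and j < m:
--             tmp += matrix[i][j]
--             i -= 1
--             j += 1
--
--         i, j = 0, idx
--         while i < m and j < m:
--             tmp += matrix[i][j]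
--             i += 1
--             j += 1
--
--         tmp -= matrix[0][idx]
--         res.append([tmp, matrix[idx][0]])
--
--     res = sorted(res, key=lambda x: (x[0], x[1]))
--     return [x[1] for x in res]
-- ===== SOURCE B (Python) =====
-- def bouncingDiagonals(matrix):
--     m = len(matrix)
--     sums = [0] * m
--     for i in range(m):
--         for j in range(m):
--             v = matrix[i][j]
--             if j >= i:
--                 sums[j - i] += v
--             if i >= 1 and i + j < m:
--                 sums[i + j] += v
--     pairs = sorted((sums[idx], matrix[idx][0]) for idx in range(m))
--     return [label for _, label in pairs]
-- ===== Notes on version B (the rewrite author's own statement) =====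
-- stated objective: alternative
-- what changed: Replaces A's per-diagonal two-leg path walking (plus apex-double-count correction) with a single scatter pass over all cells into a sums-by-label table, then one sort.
import Mathlib
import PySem

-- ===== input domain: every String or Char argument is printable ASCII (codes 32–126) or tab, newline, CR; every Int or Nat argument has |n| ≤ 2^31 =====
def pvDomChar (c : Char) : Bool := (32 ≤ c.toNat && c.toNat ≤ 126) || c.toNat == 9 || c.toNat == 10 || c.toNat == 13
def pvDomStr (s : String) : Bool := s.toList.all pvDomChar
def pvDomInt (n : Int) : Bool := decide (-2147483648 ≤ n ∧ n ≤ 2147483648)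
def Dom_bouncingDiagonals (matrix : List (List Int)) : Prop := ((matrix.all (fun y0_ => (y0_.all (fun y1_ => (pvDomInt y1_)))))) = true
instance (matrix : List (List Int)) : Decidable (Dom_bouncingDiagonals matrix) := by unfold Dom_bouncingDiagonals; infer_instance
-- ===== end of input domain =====

-- B replaces A's per-diagonal two-leg path walking with one scatter pass over all cells into a
-- sums-by-label table (alternative decomposition, same asymptotic cost); return values agree on Pre_.

-- matrix[i][j] for nonnegative in-range indices (all indices in both programs are nonnegative;
-- Pre_ keeps them in range, so getD is exact there)
def pvGet (matrix : List (List Int)) (i j : Nat) : Int := (matrix.getD i []).getD j 0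

-- ===== PORT A =====
-- 'while i >= 0 and j < m: tmp += matrix[i][j]; i -= 1; j += 1'
def pvA_leg1 (matrix : List (List Int)) (m : Nat) (i : Int) (j : Nat) (tmp : Int) : Int :=
  if 0 ≤ i ∧ j < m then pvA_leg1 matrix m (i - 1) (j + 1) (tmp + pvGet matrix i.toNat j)
  else tmp
  termination_by (i + 1).toNat
  decreasing_by omega

-- 'while i < m and j < m: tmp += matrix[i][j]; i += 1; j += 1'
def pvA_leg2 (matrix : List (List Int)) (m : Nat) (i j : Nat) (tmp : Int) : Int :=
  if i < m ∧ j < m then pvA_leg2 matrix m (i + 1) (j + 1) (tmp + pvGet matrix i j)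
  else tmp
  termination_by m - j
  decreasing_by omega

def bouncingDiagonals (matrix : List (List Int)) : List Int :=
  let m := matrix.length
  let top := (List.range m).foldl (fun acc i => acc + pvGet matrix i i) 0
  let res : List (Int × Int) := [(top, pvGet matrix 0 0)]
  -- 'for idx in range(1, m)'
  let res := (List.range' 1 (m - 1)).foldl (fun res (idx : Nat) =>
    let tmp := pvA_leg1 matrix m (idx : Int) 0 0
    let tmp := pvA_leg2 matrix m 0 idx tmp
    let tmp := tmp - pvGet matrix 0 idx
    res ++ [(tmp, pvGet matrix idx 0)]) res
  (PySem.List.sorted2 res (fun x => x.1) (fun x => x.2)).map (fun x => x.2)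

-- ===== PORT B =====
-- 'sums[k] += v'
def pvB_add (sums : List Int) (k : Nat) (v : Int) : List Int := sums.set k (sums.getD k 0 + v)

def bouncingDiagonals_alt (matrix : List (List Int)) : List Int :=
  let m := matrix.length
  let sums := List.replicate m (0 : Int)
  let sums := (List.range m).foldl (fun sums i =>
    (List.range m).foldl (fun sums j =>
      let v := pvGet matrix i j
      let sums := if i ≤ j then pvB_add sums (j - i) v else sums
      let sums := if 1 ≤ i ∧ i + j < m then pvB_add sums (i + j) v else sums
      sums) sums) sums
  let pairs := (List.range m).map (fun idx => (sums.getD idx 0, pvGet matrix idx 0))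
  (PySem.List.sorted2 pairs (fun x => x.1) (fun x => x.2)).map (fun x => x.2)

-- ===== PRECONDITION & SPEC =====
-- Pre_ excludes exactly the inputs where the Python A raises IndexError: the empty matrix
-- (matrix[0][0]) and matrices with a row shorter than len(matrix).
def Pre_bouncingDiagonals (matrix : List (List Int)) : Prop :=
  matrix ≠ [] ∧ ∀ row ∈ matrix, matrix.length ≤ row.length
instance (matrix : List (List Int)) : Decidable (Pre_bouncingDiagonals matrix) := by
  unfold Pre_bouncingDiagonals; infer_instance

def pvWitness_bouncingDiagonals : List (List Int) := [[1, 2], [3, 4]]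

def Spec_bouncingDiagonals (matrix : List (List Int)) (out : List Int) : Prop := out = bouncingDiagonals_alt matrix
instance (matrix : List (List Int)) (out : List Int) : Decidable (Spec_bouncingDiagonals matrix out) := by unfold Spec_bouncingDiagonals; infer_instance

-- ===== CLAIM (what is proved, stated in full; the proofs are below) =====
def Claim_equal_bouncingDiagonals : Prop := ∀ (matrix : List (List Int)), Dom_bouncingDiagonals matrix → Pre_bouncingDiagonals matrix → Spec_bouncingDiagonals matrix (bouncingDiagonals matrix)

-- ===== LEMMAS AND PROOFS =====

-- abbreviations used only by the proofs
def pvMainS (matrix : List (List Int)) (m L : Nat) : Int :=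
  ∑ t ∈ Finset.range (m - L), pvGet matrix t (t + L)
def pvAntiS (matrix : List (List Int)) (L : Nat) : Int :=
  ∑ k ∈ Finset.range L, pvGet matrix (k + 1) (L - (k + 1))
def pvStep (sums : List Int) (p : Nat × Int) : List Int := pvB_add sums p.1 p.2
def pvCellOps (matrix : List (List Int)) (m i j : Nat) : List (Nat × Int) :=
  (if i ≤ j then [(j - i, pvGet matrix i j)] else []) ++
  (if 1 ≤ i ∧ i + j < m then [(i + j, pvGet matrix i j)] else [])

theorem pv_sum_range_list (g : Nat → Int) (n : Nat) :
    ((List.range n).map g).sum = ∑ i ∈ Finset.range n, g i := by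
  induction n with
  | zero => simp
  | succ n ih => simp [List.range_succ, Finset.sum_range_succ, ih]

theorem pv_leg1 (matrix : List (List Int)) (m : Nat) :
    ∀ (n j : Nat) (tmp : Int), j + n < m →
      pvA_leg1 matrix m (n : Int) j tmp
        = tmp + ∑ k ∈ Finset.range (n + 1), pvGet matrix (n - k) (j + k) := by
  intro n
  induction n with
  | zero =>
    intro j tmp h
    rw [pvA_leg1, if_pos (by omega)]
    rw [pvA_leg1, if_neg (by omega)]
    simp
  | succ n ih =>
    intro j tmp h
    rw [pvA_leg1, if_pos (by constructor <;> omega)]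
    have h1 : ((n + 1 : Nat) : Int) - 1 = (n : Int) := by omega
    have h2 : ((n + 1 : Nat) : Int).toNat = n + 1 := by omega
    rw [h1, h2, ih (j + 1) _ (by omega)]
    rw [Finset.sum_range_succ' (fun k => pvGet matrix (n + 1 - k) (j + k))]
    simp only [Nat.sub_zero, Nat.add_zero]
    rw [Finset.sum_congr rfl (fun k _ => by
      show pvGet matrix (n - k) (j + 1 + k) = pvGet matrix (n + 1 - (k + 1)) (j + (k + 1))
      congr 1 <;> omega)]
    ring

theorem pv_leg2 (matrix : List (List Int)) (m : Nat) :
    ∀ (n i j : Nat) (tmp : Int), m - j = n → i ≤ j →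
      pvA_leg2 matrix m i j tmp
        = tmp + ∑ k ∈ Finset.range (m - j), pvGet matrix (i + k) (j + k) := by
  intro n
  induction n with
  | zero =>
    intro i j tmp h hij
    rw [pvA_leg2, if_neg (by omega), h]
    simp
  | succ n ih =>
    intro i j tmp h hij
    rw [pvA_leg2, if_pos (by constructor <;> omega)]
    rw [ih (i + 1) (j + 1) _ (by omega) (by omega)]
    rw [show m - j = n + 1 from h, show m - (j + 1) = n from by omega]
    rw [Finset.sum_range_succ' (fun k => pvGet matrix (i + k) (j + k))]
    rw [Finset.sum_congr rfl (fun k _ => by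
      show pvGet matrix (i + 1 + k) (j + 1 + k) = pvGet matrix (i + (k + 1)) (j + (k + 1))
      congr 1 <;> omega)]
    simp only [Nat.add_zero]
    ring

theorem pv_getD_step (sums : List Int) (k : Nat) (v : Int) (L : Nat) (hL : L < sums.length) :
    (pvStep sums (k, v)).getD L 0 = sums.getD L 0 + if k = L then v else 0 := by
  by_cases hk : k = L
  · subst hk
    simp [pvStep, pvB_add, List.getD_eq_getElem?_getD, hL]
  · simp [pvStep, pvB_add, List.getD_eq_getElem?_getD, List.getElem?_set_ne hk, hk]

theorem pv_getD_foldl_step (ops : List (Nat × Int)) (sums : List Int) (L : Nat)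
    (hL : L < sums.length) :
    (ops.foldl pvStep sums).getD L 0
      = sums.getD L 0 + (ops.map (fun p => if p.1 = L then p.2 else 0)).sum := by
  induction ops generalizing sums with
  | nil => simp
  | cons p ops ih =>
    have hlen : (pvStep sums p).length = sums.length := by simp [pvStep, pvB_add]
    simp only [List.foldl_cons, List.map_cons, List.sum_cons]
    rw [ih _ (by omega : L < (pvStep sums p).length)]
    rcases p with ⟨k, v⟩
    rw [pv_getD_step sums k v L hL]
    ring

theorem pv_foldl_to_flatMap {α : Type} (g : α → List (Nat × Int)) (l : List α) (s : List Int) :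
    l.foldl (fun s x => List.foldl pvStep s (g x)) s = List.foldl pvStep s (l.flatMap g) := by
  induction l generalizing s with
  | nil => rfl
  | cons a l ih => simp [List.flatMap_cons, List.foldl_append, ih]

theorem pv_sum_map_flatMap {α : Type} (g : α → List (Nat × Int)) (h : Nat × Int → Int)
    (l : List α) :
    ((l.flatMap g).map h).sum = (l.map (fun x => ((g x).map h).sum)).sum := by
  induction l with
  | nil => rfl
  | cons a l ih => simp [List.flatMap_cons, ih]


theorem pv_body_eq (matrix : List (List Int)) (m i j : Nat) (sums : List Int) :
    (if 1 ≤ i ∧ i + j < m then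
       pvB_add (if i ≤ j then pvB_add sums (j - i) (pvGet matrix i j) else sums) (i + j)
         (pvGet matrix i j)
     else if i ≤ j then pvB_add sums (j - i) (pvGet matrix i j) else sums)
      = List.foldl pvStep sums (pvCellOps matrix m i j) := by
  by_cases h1 : i ≤ j <;> by_cases h2 : 1 ≤ i ∧ i + j < m <;>
    simp [pvCellOps, pvStep, h1, h2]

theorem pv_cell_sum (matrix : List (List Int)) (m i j L : Nat) :
    ((pvCellOps matrix m i j).map (fun p => if p.1 = L then p.2 else 0)).sum
      = (if i ≤ j ∧ j - i = L then pvGet matrix i j else 0)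
        + (if 1 ≤ i ∧ i + j < m ∧ i + j = L then pvGet matrix i j else 0) := by
  by_cases h1 : i ≤ j <;> by_cases h2 : 1 ≤ i ∧ i + j < m <;>
      simp [pvCellOps, h1, h2] <;> (intro a b _; exact absurd ⟨a, b⟩ h2)

theorem pv_sum_range_trunc (g : Nat → Int) (n m : Nat) (h : n ≤ m) :
    (∑ i ∈ Finset.range m, if i < n then g i else 0) = ∑ i ∈ Finset.range n, g i := by
  rw [← Finset.sum_subset (s₁ := Finset.range n) (s₂ := Finset.range m)
      (fun x hx => Finset.mem_range.mpr (by have := Finset.mem_range.mp hx; omega))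
      (fun x _ hx => by rw [if_neg (by simpa using hx)])]
  exact Finset.sum_congr rfl (fun i hi => if_pos (Finset.mem_range.mp hi))

theorem pv_sums_char (matrix : List (List Int)) (L : Nat) (hL : L < matrix.length) :
    (((List.range matrix.length).foldl (fun sums i =>
        (List.range matrix.length).foldl (fun sums j =>
          if 1 ≤ i ∧ i + j < matrix.length then
            pvB_add (if i ≤ j then pvB_add sums (j - i) (pvGet matrix i j) else sums) (i + j)
              (pvGet matrix i j)
          else if i ≤ j then pvB_add sums (j - i) (pvGet matrix i j) else sums) sums)
        (List.replicate matrix.length (0 : Int))).getD L 0)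
      = pvMainS matrix matrix.length L + pvAntiS matrix L := by
  set m := matrix.length with hm
  set f := pvGet matrix with hf
  -- 1. nested loop = one foldl over the flattened op list
  have hinner : ∀ (i : Nat) (sums : List Int),
      (List.range m).foldl (fun sums j =>
        if 1 ≤ i ∧ i + j < m then
          pvB_add (if i ≤ j then pvB_add sums (j - i) (f i j) else sums) (i + j) (f i j)
        else if i ≤ j then pvB_add sums (j - i) (f i j) else sums) sums
        = List.foldl pvStep sums ((List.range m).flatMap (pvCellOps matrix m i)) := by
    intro i sums
    have h1 : (List.range m).foldl (fun sums j =>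
        if 1 ≤ i ∧ i + j < m then
          pvB_add (if i ≤ j then pvB_add sums (j - i) (f i j) else sums) (i + j) (f i j)
        else if i ≤ j then pvB_add sums (j - i) (f i j) else sums) sums
        = (List.range m).foldl (fun sums j => List.foldl pvStep sums (pvCellOps matrix m i j))
            sums :=
      PySem.List.foldl_congr_mem _ _ _ _ (fun sums j _ => pv_body_eq matrix m i j sums)
    rw [h1, pv_foldl_to_flatMap]
  have houter : (List.range m).foldl (fun sums i =>
      (List.range m).foldl (fun sums j =>
        if 1 ≤ i ∧ i + j < m then
          pvB_add (if i ≤ j then pvB_add sums (j - i) (f i j) else sums) (i + j) (f i j)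
        else if i ≤ j then pvB_add sums (j - i) (f i j) else sums) sums) (List.replicate m (0 : Int))
      = (List.range m).foldl (fun sums i =>
          List.foldl pvStep sums ((List.range m).flatMap (pvCellOps matrix m i)))
          (List.replicate m (0 : Int)) :=
    PySem.List.foldl_congr_mem _ _ _ _ (fun sums i _ => hinner i sums)
  rw [houter, pv_foldl_to_flatMap]
  -- 2. table entry = sum of matching ops
  rw [pv_getD_foldl_step _ _ _ (by simp [hL])]
  rw [pv_sum_map_flatMap, pv_sum_range_list]
  simp only [pv_sum_map_flatMap, pv_sum_range_list, pv_cell_sum]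
  rw [List.getD_eq_getElem?_getD]
  simp only [List.getElem?_replicate, hL, if_pos, Option.getD_some]
  rw [zero_add]
  rw [Finset.sum_congr rfl (fun i _ => Finset.sum_add_distrib), Finset.sum_add_distrib]
  congr 1
  -- main-direction part
  · rw [Finset.sum_congr rfl (fun i _ => Finset.sum_congr rfl (fun j _ => by
      show (if i ≤ j ∧ j - i = L then f i j else 0) = if j = i + L then f i j else 0
      split_ifs <;> first | rfl | omega))]
    rw [Finset.sum_congr rfl (fun i _ => Finset.sum_ite_eq' (Finset.range m) (i + L)
      (fun j => f i j))]
    rw [Finset.sum_congr rfl (fun i _ => by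
      show (if i + L ∈ Finset.range m then f i (i + L) else 0)
         = if i < m - L then f i (i + L) else 0
      simp only [Finset.mem_range]
      split_ifs <;> first | rfl | omega)]
    rw [pv_sum_range_trunc _ _ _ (by omega)]
    rfl
  -- anti-diagonal part
  · rw [Finset.sum_congr rfl (fun i _ => Finset.sum_congr rfl (fun j _ => by
      show (if 1 ≤ i ∧ i + j < m ∧ i + j = L then f i j else 0)
         = if 1 ≤ i ∧ i ≤ L then (if j = L - i then f i j else 0) else 0
      split_ifs <;> first | rfl | omega))]
    rw [Finset.sum_congr rfl (fun i _ => by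
      show (∑ j ∈ Finset.range m, if 1 ≤ i ∧ i ≤ L then (if j = L - i then f i j else 0) else 0)
         = if 1 ≤ i ∧ i ≤ L then f i (L - i) else 0
      by_cases hc : 1 ≤ i ∧ i ≤ L
      · simp only [if_pos hc]
        rw [Finset.sum_ite_eq' (Finset.range m) (L - i) (fun j => f i j),
          if_pos (Finset.mem_range.mpr (by omega))]
      · simp only [if_neg hc, Finset.sum_const_zero])]
    rw [Finset.sum_congr rfl (fun i _ => by
      show (if 1 ≤ i ∧ i ≤ L then f i (L - i) else 0)
         = if i < L + 1 then (if 1 ≤ i then f i (L - i) else 0) else 0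
      split_ifs <;> first | rfl | omega)]
    rw [pv_sum_range_trunc _ _ _ (by omega)]
    rw [Finset.sum_range_succ' (fun i => if 1 ≤ i then f i (L - i) else 0)]
    simp [pvAntiS, hf]

theorem pv_tmp_char (matrix : List (List Int)) (idx : Nat) (h1 : 1 ≤ idx)
    (h2 : idx < matrix.length) :
    pvA_leg2 matrix matrix.length 0 idx (pvA_leg1 matrix matrix.length (idx : Int) 0 0)
        - pvGet matrix 0 idx
      = pvMainS matrix matrix.length idx + pvAntiS matrix idx := by
  set m := matrix.length with hm
  set f := pvGet matrix with hf
  rw [pv_leg1 matrix m idx 0 0 (by omega)]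
  rw [pv_leg2 matrix m (m - idx) 0 idx _ rfl (by omega)]
  rw [Finset.sum_range_succ (fun k => f (idx - k) (0 + k)) idx]
  have hmain : (∑ k ∈ Finset.range (m - idx), f (0 + k) (idx + k)) = pvMainS matrix m idx :=
    Finset.sum_congr rfl (fun k _ => by show f (0 + k) (idx + k) = f k (k + idx); congr 1 <;> omega)
  have hanti : (∑ k ∈ Finset.range idx, f (idx - k) (0 + k)) = pvAntiS matrix idx := by
    rw [← Finset.sum_range_reflect (fun k => f (idx - k) (0 + k)) idx]
    exact Finset.sum_congr rfl (fun k hk => by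
      have := Finset.mem_range.mp hk
      show f (idx - (idx - 1 - k)) (0 + (idx - 1 - k)) = f (k + 1) (idx - (k + 1))
      congr 1 <;> omega)
  rw [hmain, hanti]
  have : f (idx - idx) (0 + idx) = f 0 idx := by congr 1 <;> omega
  rw [this]
  ring

-- ===== VERDICT (by name: the statement is the Claim_ definition above) =====
theorem pv_range_split (m : Nat) (h : 1 ≤ m) :
    List.range m = 0 :: List.range' 1 (m - 1) := by
  rw [List.range_eq_range']
  conv_lhs => rw [show m = (m - 1) + 1 from by omega]
  rfl

theorem bouncingDiagonals_spec : Claim_equal_bouncingDiagonals := by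
  intro matrix _ hpre
  unfold Spec_bouncingDiagonals
  have hm1 : 1 ≤ matrix.length := by
    rcases matrix with _ | ⟨r, t⟩
    · exact absurd rfl hpre.1
    · simp
  unfold bouncingDiagonals bouncingDiagonals_alt
  simp only []
  congr 2
  symm
  trans ((List.range matrix.length).map (fun idx =>
    (pvMainS matrix matrix.length idx + pvAntiS matrix idx, pvGet matrix idx 0)))
  · exact List.map_congr_left (fun idx hidx =>
      by rw [pv_sums_char matrix idx (List.mem_range.mp hidx)])
  · rw [PySem.List.foldl_append_singleton_eq_map, List.singleton_append,
      pv_range_split matrix.length hm1, List.map_cons]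
    congr 1
    -- head entry (label 0)
    · rw [← pv_range_split matrix.length hm1]
      simp only [pvAntiS, Finset.range_zero, Finset.sum_empty, add_zero]
      rw [PySem.List.foldl_add (List.range matrix.length) (fun i => pvGet matrix i i) 0,
        pv_sum_range_list, zero_add]
      rw [pvMainS]
      rw [Finset.sum_congr rfl (fun t _ => by
        show pvGet matrix t (t + 0) = pvGet matrix t t
        congr 1), Nat.sub_zero]
    -- remaining entries
    · refine List.map_congr_left (fun idx hidx => ?_)
      have hmem := List.mem_range'_1.mp hidx
      rw [← pv_tmp_char matrix idx (by omega) (by omega)]
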